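-- pv_equiv track=rewrite | github.com/jleinenbach/GoogleFindMy-HA | custom_components/googlefindmy/__init__.py | _normalize_visible_device_ids
-- ===== SOURCE A (Python) =====
-- from typing import TYPE_CHECKING, Any, Literal, TypedDict, TypeVar, TypeGuard, cast
-- from collections.abc import (
--     Awaitable,
--     Callable,
--     Collection,
--     Iterable,
--     Mapping,
--     Sequence,
-- )
--
-- def _strip_entry_namespace(entry_id: str, ident: str) -> str:
--     """Strip the entry namespace prefix (`<entry_id>:`) when present."""
--
--     if not ident or ":" not in ident:
--         return ident
--
--     prefix, canonical = ident.split(":", 1)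
--     if canonical and prefix == entry_id:
--         return canonical
--
--     return ident
--
-- def _normalize_visible_device_ids(
--     entry_id: str, raw_ids: Iterable[Any]
-- ) -> tuple[list[str], bool]:
--     """Normalize visible device identifiers for a subentry."""
--
--     normalized: list[str] = []
--     seen: set[str] = set()
--     changed = False
--
--     for candidate in raw_ids:
--         if not isinstance(candidate, str) or not candidate:
--             changed = True
--             continue
--         canonical = _strip_entry_namespace(entry_id, candidate)
--         if canonical != candidate:
--             changed = True
--         if canonical in seen:
--             if canonical != candidate:
--                 changed = True
--             continue
--         seen.add(canonical)
--         normalized.append(canonical)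
--
--     return normalized, changed
-- ===== SOURCE B (Python) =====
-- def _strip_entry_namespace(entry_id: str, ident: str) -> str:
--     """Strip the entry namespace prefix (`<entry_id>:`) when present."""
--
--     if not ident or ":" not in ident:
--         return ident
--
--     prefix, canonical = ident.split(":", 1)
--     if canonical and prefix == entry_id:
--         return canonical
--
--     return ident
--
--
-- def _normalize_visible_device_ids(entry_id, raw_ids):
--     """Normalize visible device identifiers for a subentry.
--
--     Back-to-front algorithm: walk raw_ids in reverse, prepending each
--     canonical form to the result and filtering out its later duplicates.
--     Prepend-and-filter yields first-occurrence order with no seen-set;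
--     exact duplicate removal never sets `changed`.
--     """
--     normalized = []
--     changed = False
--     for candidate in reversed(list(raw_ids)):
--         if not isinstance(candidate, str) or not candidate:
--             changed = True
--             continue
--         canonical = _strip_entry_namespace(entry_id, candidate)
--         if canonical != candidate:
--             changed = True
--         normalized = [canonical] + [x for x in normalized if x != canonical]
--     return normalized, changed
-- ===== Notes on version B (the rewrite author's own statement) =====
-- stated objective: alternative
-- what changed: Replaces the forward seen-set loop by a back-to-front pass that prepends each canonical form and deletes its later duplicates by filtering the accumulator (no seen set, no forward dedup), trading O(n) time for a shorter stateless dedup mechanism.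
import Mathlib
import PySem

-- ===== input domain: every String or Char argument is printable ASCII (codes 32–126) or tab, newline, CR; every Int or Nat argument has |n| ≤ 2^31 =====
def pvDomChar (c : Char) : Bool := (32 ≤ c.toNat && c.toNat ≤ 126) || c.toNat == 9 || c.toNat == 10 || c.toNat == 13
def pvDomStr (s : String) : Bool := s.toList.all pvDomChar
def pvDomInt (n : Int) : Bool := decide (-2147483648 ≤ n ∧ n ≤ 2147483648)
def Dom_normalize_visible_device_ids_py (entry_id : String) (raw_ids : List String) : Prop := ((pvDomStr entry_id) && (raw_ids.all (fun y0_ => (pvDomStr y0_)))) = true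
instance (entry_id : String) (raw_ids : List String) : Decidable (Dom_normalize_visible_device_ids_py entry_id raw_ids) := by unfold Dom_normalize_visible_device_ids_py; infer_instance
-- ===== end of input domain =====

-- B walks the list back-to-front, prepending each canonical id and filtering its later duplicates out of the accumulator (no seen set); same result, no speed claim.

-- ===== PORT A =====
-- shared helper: port of _strip_entry_namespace (identical source in Source A and Source B)
def strip_entry_namespace_py (entry_id : String) (ident : String) : String :=
  if ident == "" || PySem.Str.isIn ":" ident == false then ident
  else
    match PySem.Str.splitMax? ident ":" 1 with
    | some (pre :: canonical :: _) =>
        if canonical != "" && pre == entry_id then canonical else ident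
    | _ => ident

-- the 'for candidate in raw_ids' loop of A, state (normalized, seen, changed)
def normalize_loopA (entry_id : String) : List String → List String → PySem.Set String → Bool → List String × Bool
  | [], normalized, _, changed => (normalized, changed)
  | c :: rest, normalized, seen, changed =>
    if c == "" then normalize_loopA entry_id rest normalized seen true
    else
      let canonical := strip_entry_namespace_py entry_id c
      let changed1 := if canonical != c then true else changed
      if PySem.Set.contains seen canonical then
        normalize_loopA entry_id rest normalized seen (if canonical != c then true else changed1)
      else
        normalize_loopA entry_id rest (normalized ++ [canonical]) (PySem.Set.add seen canonical) changed1

def normalize_visible_device_ids_py (entry_id : String) (raw_ids : List String) : List String × Bool :=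
  normalize_loopA entry_id raw_ids [] PySem.Set.empty false

-- ===== PORT B =====
-- one iteration of B's 'for candidate in reversed(list(raw_ids))' loop, state (normalized, changed)
def normalize_stepB (entry_id : String) (st : List String × Bool) (c : String) : List String × Bool :=
  if c == "" then (st.1, true)
  else
    let canonical := strip_entry_namespace_py entry_id c
    let changed := if canonical != c then true else st.2
    (canonical :: st.1.filter (fun x => x != canonical), changed)

def normalize_visible_device_ids_py_alt (entry_id : String) (raw_ids : List String) : List String × Bool :=
  raw_ids.reverse.foldl (normalize_stepB entry_id) ([], false)

-- ===== PRECONDITION & SPEC =====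
def Spec_normalize_visible_device_ids_py (entry_id : String) (raw_ids : List String) (out : List String × Bool) : Prop := out = normalize_visible_device_ids_py_alt entry_id raw_ids
instance (entry_id : String) (raw_ids : List String) (out : List String × Bool) : Decidable (Spec_normalize_visible_device_ids_py entry_id raw_ids out) := by unfold Spec_normalize_visible_device_ids_py; infer_instance

-- ===== CLAIM (what is proved, stated in full; the proofs are below) =====
def Claim_equal_normalize_visible_device_ids_py : Prop := ∀ (entry_id : String) (raw_ids : List String), Dom_normalize_visible_device_ids_py entry_id raw_ids → Spec_normalize_visible_device_ids_py entry_id raw_ids (normalize_visible_device_ids_py entry_id raw_ids)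

-- ===== LEMMAS AND PROOFS =====

-- first-occurrence dedup continued from an already-seen set (characterises A's seen-set loop)
def dedupFrom (seen : PySem.Set String) : List String → List String
  | [] => []
  | y :: ys => if PySem.Set.contains seen y then dedupFrom seen ys else y :: dedupFrom (PySem.Set.add seen y) ys

-- B's prepend-and-filter insertion
def insFront (y : String) (acc : List String) : List String := y :: acc.filter (fun x => x != y)

theorem normalize_loopA_eq (entry_id : String) (xs : List String)
    (normalized : List String) (seen : PySem.Set String) (changed : Bool) :
    normalize_loopA entry_id xs normalized seen changed =
      (normalized ++ dedupFrom seen ((xs.filter (fun c => c != "")).map (strip_entry_namespace_py entry_id)),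
       changed || xs.any (fun c => c == "" || strip_entry_namespace_py entry_id c != c)) := by
  induction xs generalizing normalized seen changed with
  | nil => simp [normalize_loopA, dedupFrom]
  | cons c rest ih =>
    by_cases hc : c = ""
    · subst hc
      simp only [normalize_loopA, ih]
      simp
    · have hc' : (c == "") = false := by simp [hc]
      simp only [normalize_loopA, hc', Bool.false_eq_true, if_false]
      by_cases h : strip_entry_namespace_py entry_id c = c
      · rw [h]
        by_cases hs : c ∈ seen <;>
          simp [PySem.Set.contains, PySem.Set.add, hs, h, hc, hc', ih, dedupFrom, Bool.or_comm]
      · by_cases hs : strip_entry_namespace_py entry_id c ∈ seen <;>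
          simp [PySem.Set.contains, PySem.Set.add, hs, h, hc, hc', ih, dedupFrom, Bool.or_comm]

-- characterise B's reversed loop as a right fold, split componentwise
theorem foldrB_eq (entry_id : String) (xs : List String) :
    xs.foldr (fun c st => normalize_stepB entry_id st c) ([], false) =
      (((xs.filter (fun c => c != "")).map (strip_entry_namespace_py entry_id)).foldr insFront [],
       xs.any (fun c => c == "" || strip_entry_namespace_py entry_id c != c)) := by
  induction xs with
  | nil => simp
  | cons c rest ih =>
    simp only [List.foldr_cons, ih]
    by_cases hc : c = ""
    · subst hc
      simp [normalize_stepB]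
    · by_cases h : strip_entry_namespace_py entry_id c = c <;>
        simp [normalize_stepB, hc, h, insFront, Bool.or_comm]

-- dedupFrom seen l = B's foldr with elements of seen filtered away
theorem dedupFrom_eq_foldr (l : List String) (seen : PySem.Set String) :
    dedupFrom seen l = (l.foldr insFront []).filter (fun x => !(PySem.Set.contains seen x)) := by
  induction l generalizing seen with
  | nil => simp [dedupFrom]
  | cons c ys ih =>
    by_cases hs : c ∈ seen
    · have hcon : PySem.Set.contains seen c = true := by simpa [PySem.Set.contains] using hs
      simp only [dedupFrom, List.foldr_cons, insFront, List.filter_cons, hcon, if_true,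
        Bool.not_true, Bool.false_eq_true, if_false, ih]
      rw [List.filter_filter]
      apply List.filter_congr
      intro x _
      by_cases hx : x ∈ seen
      · simp [PySem.Set.contains, hx]
      · have hxc : x ≠ c := fun h => hx (h ▸ hs)
        simp [PySem.Set.contains, hx, hxc]
    · have hcon : PySem.Set.contains seen c = false := by simpa [PySem.Set.contains] using hs
      have hadd : PySem.Set.add seen c = seen ++ [c] := by
        simp [PySem.Set.add, PySem.Set.contains, hs]
      simp only [dedupFrom, List.foldr_cons, insFront, List.filter_cons, hcon,
        Bool.false_eq_true, if_false, Bool.not_false, if_true, ih, hadd]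
      congr 1
      rw [List.filter_filter]
      apply List.filter_congr
      intro x _
      by_cases hx : x ∈ seen
      · simp [PySem.Set.contains, hx]
      · by_cases hxc : x = c <;> simp [PySem.Set.contains, hx, hxc]

-- ===== VERDICT (by name: the statement is the Claim_ definition above) =====
theorem normalize_visible_device_ids_py_spec : Claim_equal_normalize_visible_device_ids_py := by
  intro entry_id raw_ids _
  show _ = _
  rw [normalize_visible_device_ids_py, normalize_loopA_eq,
    normalize_visible_device_ids_py_alt, List.foldl_reverse, foldrB_eq,
    dedupFrom_eq_foldr]
  simp [PySem.Set.empty, PySem.Set.contains]
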